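-- pv_equiv track=rewrite | github.com/shellydeforte/deconstruct_lc | deconstruct_lc/old/puncta/puncta_scores.py | bin_two
-- ===== SOURCE A (Python) =====
-- def bin_two(scores):
--     bins = [0, 0]
--     for score in scores:
--         if score <= 0:
--             bins[0] += 1
--         else:
--             bins[1] += 1
--     return bins
-- ===== SOURCE B (Python) =====
-- def bin_two(scores):
--     data = sorted(scores)
--     lo, hi = 0, len(data)
--     while lo < hi:
--         mid = (lo + hi) // 2
--         if data[mid] <= 0:
--             lo = mid + 1
--         else:
--             hi = mid
--     return [lo, len(data) - lo]
-- ===== Notes on version B (the rewrite author's own statement) =====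
-- stated objective: alternative
-- what changed: B sorts the scores and binary-searches the boundary between non-positive and positive values, reading both bin counts off that boundary index, instead of A's per-element if/else counting pass.
import Mathlib
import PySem

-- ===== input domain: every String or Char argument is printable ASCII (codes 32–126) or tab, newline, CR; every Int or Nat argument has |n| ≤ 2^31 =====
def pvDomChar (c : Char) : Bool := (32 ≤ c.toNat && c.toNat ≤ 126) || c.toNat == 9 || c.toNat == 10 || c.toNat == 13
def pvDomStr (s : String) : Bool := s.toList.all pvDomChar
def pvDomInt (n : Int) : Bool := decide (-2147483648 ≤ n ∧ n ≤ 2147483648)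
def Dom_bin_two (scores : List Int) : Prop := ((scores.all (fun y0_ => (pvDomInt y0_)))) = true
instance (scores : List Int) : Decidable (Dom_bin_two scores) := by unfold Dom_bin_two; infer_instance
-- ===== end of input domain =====

-- B sorts the scores and binary-searches the non-positive/positive boundary instead of
-- A's per-element if/else counting pass (objective: alternative).

-- ===== PORT A =====
-- A folds over scores keeping the pair (bins[0], bins[1]), incrementing one per element.
def bin_two (scores : List Int) : List Int :=
  let bins := scores.foldl (fun (b : Int × Int) score =>
    if score ≤ 0 then (b.1 + 1, b.2) else (b.1, b.2 + 1)) (0, 0)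
  [bins.1, bins.2]

-- ===== PORT B =====
-- B's while-loop binary search on the sorted list; mid is always in range (lo < hi ≤ len),
-- so getD is exact for data[mid].
def binTwoSearch (data : List Int) (lo hi : Nat) : Nat :=
  if lo < hi then
    let mid := (lo + hi) / 2
    if data.getD mid 0 ≤ 0 then binTwoSearch data (mid + 1) hi
    else binTwoSearch data lo mid
  else lo
termination_by hi - lo
decreasing_by all_goals omega

def bin_two_alt (scores : List Int) : List Int :=
  let data := PySem.List.sorted scores (fun x => x) false
  let lo := binTwoSearch data 0 data.length
  [(lo : Int), (data.length : Int) - (lo : Int)]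

-- ===== PRECONDITION & SPEC =====
def Spec_bin_two (scores : List Int) (out : List Int) : Prop := out = bin_two_alt scores
instance (scores : List Int) (out : List Int) : Decidable (Spec_bin_two scores out) := by unfold Spec_bin_two; infer_instance

-- ===== CLAIM (what is proved, stated in full; the proofs are below) =====
def Claim_equal_bin_two : Prop := ∀ (scores : List Int), Dom_bin_two scores → Spec_bin_two scores (bin_two scores)

-- ===== LEMMAS AND PROOFS =====
-- A's fold adds the two conditional counts to its accumulator.
lemma bin_two_fold (scores : List Int) (a b : Int) :
    scores.foldl (fun (p : Int × Int) score =>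
      if score ≤ 0 then (p.1 + 1, p.2) else (p.1, p.2 + 1)) (a, b)
    = (a + ((scores.countP (fun s => s ≤ 0)) : Int),
       b + ((scores.length : Int) - ((scores.countP (fun s => s ≤ 0)) : Int))) := by
  induction scores generalizing a b with
  | nil => simp
  | cons x xs ih =>
    by_cases hx : x ≤ 0 <;>
      simp [hx, ih, Prod.ext_iff] <;> ring

-- The binary search returns a boundary index: everything below it is ≤ 0,
-- everything from it on is > 0.
lemma binTwoSearch_spec (d : List Int) (hsort : d.Pairwise (· ≤ ·)) :
    ∀ lo hi, lo ≤ hi → hi ≤ d.length →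
    (∀ i, i < lo → d.getD i 0 ≤ 0) →
    (∀ i, hi ≤ i → i < d.length → 0 < d.getD i 0) →
    binTwoSearch d lo hi ≤ d.length ∧
    (∀ i, i < binTwoSearch d lo hi → d.getD i 0 ≤ 0) ∧
    (∀ i, binTwoSearch d lo hi ≤ i → i < d.length → 0 < d.getD i 0) := by
  intro lo hi
  induction hn : hi - lo using Nat.strong_induction_on generalizing lo hi with
  | _ n ih =>
    intro hlh hhn hlow hhigh
    rw [binTwoSearch]
    by_cases hlt : lo < hi
    · simp only [hlt, if_true]
      have hmid : (lo + hi) / 2 < d.length := by omega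
      by_cases hv : d.getD ((lo + hi) / 2) 0 ≤ 0
      · simp only [hv, if_true]
        refine ih (hi - ((lo + hi) / 2 + 1)) (by omega) _ _ rfl (by omega) hhn ?_ hhigh
        intro i hi'
        rcases Nat.lt_or_ge i lo with h | h
        · exact hlow i h
        · -- lo ≤ i ≤ mid: d[i] ≤ d[mid] ≤ 0 by sortedness
          have hi2 : i < d.length := by omega
          rw [List.getD_eq_getElem d 0 hi2]
          rcases Nat.eq_or_lt_of_le (Nat.le_of_lt_succ hi') with he | hl
          · subst he; rwa [List.getD_eq_getElem d 0 hmid] at hv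
          · have := (List.pairwise_iff_getElem.mp hsort) i ((lo + hi) / 2) hi2 hmid hl
            have hv' := hv; rw [List.getD_eq_getElem d 0 hmid] at hv'
            exact le_trans this hv'
      · simp only [hv, if_false]
        refine ih ((lo + hi) / 2 - lo) (by omega) _ _ rfl (by omega) (by omega) hlow ?_
        intro i hi' hi2
        -- mid ≤ i: 0 < d[mid] ≤ d[i]
        have h0 : 0 < d.getD ((lo + hi) / 2) 0 := by
          rw [List.getD_eq_getElem d 0 hmid]
          rw [List.getD_eq_getElem d 0 hmid] at hv; omega
        rcases Nat.eq_or_lt_of_le hi' with he | hl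
        · rw [← he]; exact h0
        · have := (List.pairwise_iff_getElem.mp hsort) ((lo + hi) / 2) i hmid hi2 hl
          rw [List.getD_eq_getElem d 0 hi2]
          rw [List.getD_eq_getElem d 0 hmid] at h0
          exact lt_of_lt_of_le h0 this
    · simp only [hlt, if_false]
      exact ⟨by omega, hlow, fun i h1 h2 => hhigh i (by omega) h2⟩

-- A boundary index IS the count of non-positives.
lemma countP_eq_boundary (d : List Int) (r : Nat) (hr : r ≤ d.length)
    (hlow : ∀ i, i < r → d.getD i 0 ≤ 0)
    (hhigh : ∀ i, r ≤ i → i < d.length → 0 < d.getD i 0) :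
    d.countP (fun s => decide (s ≤ 0)) = r := by
  have hsplit : d = d.take r ++ d.drop r := (List.take_append_drop r d).symm
  rw [hsplit, List.countP_append]
  have h1 : (d.take r).countP (fun s => decide (s ≤ 0)) = r := by
    rw [List.countP_eq_length.mpr, List.length_take_of_le hr]
    intro a ha
    obtain ⟨i, hi, hget⟩ := List.getElem_of_mem ha
    have hil : i < r := by have := List.length_take_of_le hr; omega
    have : a = d.getD i 0 := by
      rw [List.getD_eq_getElem d 0 (by omega), ← hget, List.getElem_take]
    simpa [this] using hlow i hil
  have h2 : (d.drop r).countP (fun s => decide (s ≤ 0)) = 0 := by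
    rw [List.countP_eq_zero]
    intro a ha
    obtain ⟨i, hi, hget⟩ := List.getElem_of_mem ha
    have hlen : (d.drop r).length = d.length - r := List.length_drop ..
    have : a = d.getD (r + i) 0 := by
      rw [List.getD_eq_getElem d 0 (by omega), ← hget, List.getElem_drop]
    have hpos := hhigh (r + i) (by omega) (by omega)
    rw [‹a = _›]
    simp only [not_le, decide_eq_true_eq]
    omega
  omega

-- ===== VERDICT (by name: the statement is the Claim_ definition above) =====
theorem bin_two_spec : Claim_equal_bin_two := by
  intro scores _
  show _ = _
  set d := PySem.List.sorted scores (fun x => x) false with hd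
  have hperm : d.Perm scores := PySem.List.sorted_perm ..
  have hsort : d.Pairwise (· ≤ ·) := PySem.List.sorted_pairwise ..
  obtain ⟨hr, hlow, hhigh⟩ :=
    binTwoSearch_spec d hsort 0 d.length (Nat.zero_le _) le_rfl
      (by omega) (by omega)
  have hcount : d.countP (fun s => decide (s ≤ 0)) = binTwoSearch d 0 d.length :=
    countP_eq_boundary d _ hr hlow hhigh
  have hcp : scores.countP (fun s => decide (s ≤ 0)) = binTwoSearch d 0 d.length := by
    rw [← hperm.countP_eq]; exact hcount
  have hlen : scores.length = d.length := hperm.length_eq.symm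
  simp only [bin_two, bin_two_alt, bin_two_fold, ← hd]
  rw [← hcp, hlen]
  simp
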